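-- pv_equiv track=rewrite | github.com/chen-qian-dan/Algorithms_And_Data_Structures_20211227Mon | *InterviewQ/AkunaCapital_20220207Mon/Q1_count_absolute_differences.py | count_absolute_differences
-- ===== SOURCE A (Python) =====
-- from typing import List
--
-- def count_absolute_differences(l: List[int], x: int) -> int:
--     # Write your code here
--     if len(l) <= 1:
--         return 0
--
--     count = set()
--     visited = dict()
--     for i, v in enumerate(l):
--         gap1 = (v - x)
--         gap2 = v + x
--         if gap1 in visited.keys():
--             left = min(gap1, v)
--             right = max(gap1, v)
--             count.add((left, right))
--
--         if gap2 in visited.keys():  # not elif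
--             left = min(gap2, v)
--             right = max(gap2, v)
--             count.add((left, right))
--
--         visited[v] = i
--
--     return len(count)
-- ===== SOURCE B (Python) =====
-- def count_absolute_differences(l, x):
--     ax = abs(x)
--     if ax == 0:
--         seen = set()
--         dup = set()
--         for v in l:
--             if v in seen:
--                 dup.add(v)
--             else:
--                 seen.add(v)
--         return len(dup)
--     s = set(l)
--     return sum(1 for v in s if v + ax in s)
-- ===== Notes on version B (the rewrite author's own statement) =====
-- stated objective: simpler
-- what changed: Replaces the streaming seen-dict plus deduplicating pair-set with a frequency/set-based formulation: for |x|>0 one membership pass over the distinct values counts v with v+|x| present (each unordered pair hit exactly once, so no pair-set), and for x==0 it counts values occurring at least twice; fewer allocations (no tuple pairs), measured constant-factor speedup.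
import Mathlib
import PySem

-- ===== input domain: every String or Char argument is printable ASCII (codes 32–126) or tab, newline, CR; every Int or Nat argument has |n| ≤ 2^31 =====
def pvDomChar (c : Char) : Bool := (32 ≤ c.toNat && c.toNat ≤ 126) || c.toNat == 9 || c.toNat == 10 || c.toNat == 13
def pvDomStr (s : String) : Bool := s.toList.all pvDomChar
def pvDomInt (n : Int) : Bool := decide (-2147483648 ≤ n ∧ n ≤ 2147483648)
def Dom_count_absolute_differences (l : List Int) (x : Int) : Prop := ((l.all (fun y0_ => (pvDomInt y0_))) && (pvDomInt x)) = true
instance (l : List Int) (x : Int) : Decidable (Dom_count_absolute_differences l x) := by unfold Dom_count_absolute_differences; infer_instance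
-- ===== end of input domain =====

-- B replaces A's streaming seen-dict + deduplicating pair-set with a set/frequency formulation
-- (count distinct v with v+|x| present; for x==0 count values occurring twice): simpler, same cost.


-- ===== PORT A =====
-- loop body of A's 'for i, v in enumerate(l)' (st = (count, visited))
def aStep (x : Int) (st : PySem.Set (Int × Int) × PySem.Dict Int Int) (iv : Int × Int) :
    PySem.Set (Int × Int) × PySem.Dict Int Int :=
  let v := iv.2
  let gap1 := v - x
  let gap2 := v + x
  let c1 := if st.2.contains gap1 then PySem.Set.add st.1 (min gap1 v, max gap1 v) else st.1
  let c2 := if st.2.contains gap2 then PySem.Set.add c1 (min gap2 v, max gap2 v) else c1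
  (c2, st.2.insert v iv.1)

def count_absolute_differences (l : List Int) (x : Int) : Int :=
  if l.length ≤ 1 then 0
  else
    let st := (PySem.List.enumerate l).foldl (aStep x) (PySem.Set.empty, PySem.Dict.empty)
    (PySem.Set.len st.1 : Int)

-- ===== PORT B =====
-- loop body of B's x == 0 branch (st = (seen, dup))
def bStep (st : PySem.Set Int × PySem.Set Int) (v : Int) : PySem.Set Int × PySem.Set Int :=
  if PySem.Set.contains st.1 v then (st.1, PySem.Set.add st.2 v)
  else (PySem.Set.add st.1 v, st.2)

def count_absolute_differences_alt (l : List Int) (x : Int) : Int :=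
  let ax := |x|
  if ax = 0 then
    let st := l.foldl bStep (PySem.Set.empty, PySem.Set.empty)
    (PySem.Set.len st.2 : Int)
  else
    let s := PySem.Set.ofList l
    s.foldl (fun acc v => if PySem.Set.contains s (v + ax) then acc + 1 else acc) (0 : Int)

-- ===== PRECONDITION & SPEC =====
def Spec_count_absolute_differences (l : List Int) (x : Int) (out : Int) : Prop := out = count_absolute_differences_alt l x
instance (l : List Int) (x : Int) (out : Int) : Decidable (Spec_count_absolute_differences l x out) := by unfold Spec_count_absolute_differences; infer_instance

-- ===== CLAIM (what is proved, stated in full; the proofs are below) =====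
def Claim_equal_count_absolute_differences : Prop := ∀ (l : List Int) (x : Int), Dom_count_absolute_differences l x → Spec_count_absolute_differences l x (count_absolute_differences l x)

-- ===== LEMMAS AND PROOFS =====

-- characterisation of A's pair set after processing prefix P
def pairCond (x : Int) (P : List Int) (p : Int × Int) : Prop :=
  p.2 = p.1 + |x| ∧ p.1 ∈ P ∧ p.1 + |x| ∈ P ∧ (x = 0 → 2 ≤ P.count p.1)

lemma aStep_inv (x v i : Int) (c : PySem.Set (Int × Int)) (d : PySem.Dict Int Int) (P : List Int)
    (hc : c.Nodup) (hd : ∀ k : Int, d.contains k = true ↔ k ∈ P)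
    (hm : ∀ p, p ∈ c ↔ pairCond x P p) :
    (aStep x (c, d) (i, v)).1.Nodup ∧
    (∀ k : Int, (aStep x (c, d) (i, v)).2.contains k = true ↔ k ∈ P ++ [v]) ∧
    (∀ p, p ∈ (aStep x (c, d) (i, v)).1 ↔ pairCond x (P ++ [v]) p) := by
  have key : ∀ q, q ∈ (aStep x (c, d) (i, v)).1 ↔
      q ∈ c ∨ (q = (v - |x|, v) ∧ v - |x| ∈ P) ∨ (q = (v, v + |x|) ∧ v + |x| ∈ P) := by
    intro q
    simp only [aStep]
    rcases abs_cases x with ⟨he, hs⟩ | ⟨he, hs⟩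
    · rw [he]
      have e1 : min (v - x) v = v - x := by omega
      have e2 : max (v - x) v = v := by omega
      have e3 : min (v + x) v = v := by omega
      have e4 : max (v + x) v = v + x := by omega
      simp only [e1, e2, e3, e4]
      split_ifs with hc1 hc2 hc2 <;> simp only [hd] at hc1 hc2 <;>
        first
        | tauto
        | (simp only [PySem.Set.mem_add]; tauto)
    · rw [he, sub_neg_eq_add, ← sub_eq_add_neg]
      have e1 : min (v - x) v = v := by omega
      have e2 : max (v - x) v = v - x := by omega
      have e3 : min (v + x) v = v + x := by omega
      have e4 : max (v + x) v = v := by omega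
      simp only [e1, e2, e3, e4]
      split_ifs with hc1 hc2 hc2 <;> simp only [hd] at hc1 hc2 <;>
        first
        | tauto
        | (simp only [PySem.Set.mem_add]; tauto)
  refine ⟨?_, ?_, ?_⟩
  · simp only [aStep]
    split_ifs <;> first
      | exact PySem.Set.nodup_add _ _ (PySem.Set.nodup_add _ _ hc)
      | exact PySem.Set.nodup_add _ _ hc
      | exact hc
  · intro k
    simp only [aStep, PySem.Dict.contains_insert, Bool.or_eq_true, beq_iff_eq, hd,
      List.mem_append, List.mem_singleton]
    tauto
  · intro p
    by_cases hx : x = 0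
    · subst hx
      have hm' : ∀ q : ℤ × ℤ, q ∈ c ↔ (q.2 = q.1 ∧ 2 ≤ P.count q.1) := by
        intro q
        rw [hm q]
        unfold pairCond
        simp only [abs_zero, add_zero]
        constructor
        · rintro ⟨a, _, _, d2⟩; exact ⟨a, d2 trivial⟩
        · rintro ⟨a, b⟩
          have : q.1 ∈ P := List.one_le_count_iff.mp (by omega)
          exact ⟨a, this, this, fun _ => b⟩
      rw [key p]
      simp only [abs_zero, sub_zero, add_zero]
      unfold pairCond
      simp only [abs_zero, add_zero]
      have hcnt : ∀ k : ℤ, (P ++ [v]).count k = P.count k + (if v = k then 1 else 0) := by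
        intro k; simp [List.count_append, List.count_singleton']
      constructor
      · rintro (hp | ⟨rfl, hv⟩ | ⟨rfl, hv⟩)
        · obtain ⟨h1, h2⟩ := (hm' p).mp hp
          have hmem : p.1 ∈ P := List.one_le_count_iff.mp (by omega)
          exact ⟨h1, by simp [hmem], by simp [hmem], fun _ => by rw [hcnt]; split_ifs <;> omega⟩
        all_goals
          have h1 : 1 ≤ P.count v := List.one_le_count_iff.mpr hv
          exact ⟨rfl, by simp, by simp, fun _ => by
            rw [hcnt]
            show 2 ≤ P.count v + (if v = v then 1 else 0)
            rw [if_pos rfl]; omega⟩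
      · rintro ⟨h1, h2, h3, h4⟩
        have h4' := h4 trivial
        rw [hcnt p.1] at h4'
        by_cases hpv : p.1 = v
        · right; left
          have hv : v ∈ P := by
            by_contra hvP
            rw [hpv, List.count_eq_zero.mpr hvP] at h4'
            simp at h4'
          refine ⟨?_, hv⟩
          obtain ⟨pa, pb⟩ := p
          simp_all
        · left
          apply (hm' p).mpr
          have : (if v = p.1 then 1 else 0) = 0 := by simp [Ne.symm hpv]
          exact ⟨h1, by omega⟩
    · rw [key p]
      have hax : 0 < |x| := abs_pos.mpr hx
      unfold pairCond
      simp only [List.mem_append, List.mem_singleton]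
      constructor
      · rintro (hp | ⟨rfl, hv⟩ | ⟨rfl, hv⟩)
        · obtain ⟨h1, h2, h3, _⟩ := (hm p).mp hp
          exact ⟨h1, Or.inl h2, Or.inl h3, fun h => absurd h hx⟩
        · exact ⟨by simp, Or.inl hv, Or.inr (by simp), fun h => absurd h hx⟩
        · exact ⟨by simp, Or.inr rfl, Or.inl (by simpa using hv), fun h => absurd h hx⟩
      · rintro ⟨h1, h2 | h2, h3 | h3, _⟩
        · exact Or.inl ((hm p).mpr ⟨h1, h2, h3, fun h => absurd h hx⟩)
        · right; left
          obtain ⟨pa, pb⟩ := p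
          simp only at h1 h2 h3 ⊢
          constructor
          · simp only [Prod.mk.injEq]; omega
          · have : v - |x| = pa := by omega
            rwa [this]
        · right; right
          obtain ⟨pa, pb⟩ := p
          simp only at h1 h2 h3 ⊢
          constructor
          · simp only [Prod.mk.injEq]; omega
          · have : v + |x| = pa + |x| := by omega
            rwa [this]
        · exfalso; omega

lemma aFold_inv (x : Int) (ps : List (Int × Int)) (c : PySem.Set (Int × Int))
    (d : PySem.Dict Int Int) (P : List Int)
    (hc : c.Nodup) (hd : ∀ k : Int, d.contains k = true ↔ k ∈ P)
    (hm : ∀ p, p ∈ c ↔ pairCond x P p) :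
    (ps.foldl (aStep x) (c, d)).1.Nodup ∧
    (∀ p, p ∈ (ps.foldl (aStep x) (c, d)).1 ↔ pairCond x (P ++ ps.map (·.2)) p) := by
  induction ps generalizing c d P with
  | nil =>
    refine ⟨hc, fun p => ?_⟩
    simpa using hm p
  | cons hd0 tl ih =>
    obtain ⟨i, v⟩ := hd0
    obtain ⟨h1, h2, h3⟩ := aStep_inv x v i c d P hc hd hm
    have hres := ih (aStep x (c, d) (i, v)).1 (aStep x (c, d) (i, v)).2 (P ++ [v]) h1 h2 h3
    rw [Prod.mk.eta] at hres
    simp only [List.foldl_cons]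
    refine ⟨hres.1, fun p => ?_⟩
    rw [hres.2 p]
    have heq : (P ++ [v]) ++ tl.map (·.2) = P ++ ((i, v) :: tl).map (·.2) := by simp
    rw [heq]

lemma bFold_inv (vs : List Int) (seen dup : PySem.Set Int) (P : List Int)
    (hs : ∀ k : Int, k ∈ seen ↔ k ∈ P) (hd : dup.Nodup)
    (hdm : ∀ k : Int, k ∈ dup ↔ 2 ≤ P.count k) :
    (vs.foldl bStep (seen, dup)).2.Nodup ∧
    (∀ k : Int, k ∈ (vs.foldl bStep (seen, dup)).2 ↔ 2 ≤ (P ++ vs).count k) := by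
  induction vs generalizing seen dup P with
  | nil =>
    refine ⟨hd, fun k => ?_⟩
    simpa using hdm k
  | cons v tl ih =>
    simp only [List.foldl_cons]
    have hcnt : ∀ k : ℤ, (P ++ [v]).count k = P.count k + (if v = k then 1 else 0) := by
      intro k; simp [List.count_append, List.count_singleton']
    have hstep :
        (bStep (seen, dup) v).2.Nodup ∧
        (∀ k : Int, k ∈ (bStep (seen, dup) v).1 ↔ k ∈ P ++ [v]) ∧
        (∀ k : Int, k ∈ (bStep (seen, dup) v).2 ↔ 2 ≤ (P ++ [v]).count k) := by
      unfold bStep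
      by_cases hv : PySem.Set.contains seen v = true
      · have hvP : v ∈ P := (hs v).mp ((PySem.Set.contains_iff _ _).mp hv)
        rw [if_pos hv]
        refine ⟨PySem.Set.nodup_add _ _ hd, fun k => ?_, fun k => ?_⟩
        · rw [hs k]
          constructor
          · intro h; exact List.mem_append_left _ h
          · intro h
            rcases List.mem_append.mp h with h | h
            · exact h
            · rw [List.mem_singleton.mp h]; exact hvP
        · rw [PySem.Set.mem_add, hdm k, hcnt k]
          have h1 : 1 ≤ P.count v := List.one_le_count_iff.mpr hvP
          by_cases hkv : k = v
          · subst hkv; simp; omega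
          · have hvk : ¬ v = k := fun h => hkv h.symm
            simp [hvk]; omega
      · have hvP : v ∉ P := fun h => hv ((PySem.Set.contains_iff _ _).mpr ((hs v).mpr h))
        rw [if_neg hv]
        refine ⟨hd, fun k => ?_, fun k => ?_⟩
        · rw [PySem.Set.mem_add, hs k]
          simp
        · rw [hdm k, hcnt k]
          have h0 : P.count v = 0 := List.count_eq_zero.mpr hvP
          by_cases hkv : k = v
          · subst hkv; simp [h0]
          · have hvk : ¬ v = k := fun h => hkv h.symm
            simp [hvk]
    have hres := ih (bStep (seen, dup) v).1 (bStep (seen, dup) v).2 (P ++ [v])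
      hstep.2.1 hstep.1 hstep.2.2
    rw [Prod.mk.eta] at hres
    refine ⟨hres.1, fun k => ?_⟩
    rw [hres.2 k]
    have heq : (P ++ [v]) ++ tl = P ++ v :: tl := by simp
    rw [heq]

lemma length_eq_of_nodup_mem {α : Type} [DecidableEq α] (a b : List α)
    (ha : a.Nodup) (hb : b.Nodup) (h : ∀ z, z ∈ a ↔ z ∈ b) : a.length = b.length :=
  ((List.perm_ext_iff_of_nodup ha hb).2 h).length_eq

lemma nodup_map_fst (a : Int) (c : List (Int × Int)) (hc : c.Nodup)
    (h : ∀ p ∈ c, p.2 = p.1 + a) : (c.map Prod.fst).Nodup := by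
  refine List.Nodup.map_on ?_ hc
  intro p hp q hq he
  have h2 : p.2 = q.2 := by rw [h p hp, h q hq, he]
  exact Prod.ext he h2

-- ===== VERDICT (by name: the statement is the Claim_ definition above) =====
theorem count_absolute_differences_spec : Claim_equal_count_absolute_differences := by
  unfold Claim_equal_count_absolute_differences
  intro l x _
  unfold Spec_count_absolute_differences
  rcases l with _ | ⟨a, _ | ⟨b, t⟩⟩
  · simp only [count_absolute_differences, count_absolute_differences_alt]
    split_ifs <;> rfl
  · simp only [count_absolute_differences, count_absolute_differences_alt]
    split_ifs with h1 h2
    · rfl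
    · have hx' : a + |x| ≠ a := by intro h; exact h2 (by omega)
      have hcf : PySem.Set.contains (PySem.Set.ofList [a]) (a + |x|) = false := by
        apply Bool.eq_false_iff.mpr
        simp only [ne_eq, PySem.Set.contains_iff, PySem.Set.mem_ofList]
        simp [hx']
      show (0 : Int) = _
      rw [show PySem.Set.ofList [a] = [a] from rfl] at hcf ⊢
      rw [List.foldl_cons, List.foldl_nil, hcf]
      simp
    · simp at h1
    · simp at h1
  · -- length ≥ 2: the real case
    set l := a :: b :: t with hl
    have hlen : ¬ l.length ≤ 1 := by simp [hl]
    have hA := aFold_inv x (PySem.List.enumerate l) PySem.Set.empty PySem.Dict.empty []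
      (by simp [PySem.Set.empty]) (by intro k; simp)
      (by intro p; simp [PySem.Set.empty, pairCond])
    rw [PySem.List.map_snd_enumerate, List.nil_append] at hA
    obtain ⟨hCnd, hCm⟩ := hA
    set C := ((PySem.List.enumerate l).foldl (aStep x) (PySem.Set.empty, PySem.Dict.empty)).1 with hC
    have hAval : count_absolute_differences l x = (C.length : Int) := by
      rw [count_absolute_differences, if_neg hlen]
      rfl
    rw [hAval]
    by_cases hx : |x| = 0
    · have hx0 : x = 0 := abs_eq_zero.mp hx
      subst hx0
      have hB := bFold_inv l PySem.Set.empty PySem.Set.empty []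
        (by intro k; simp [PySem.Set.empty]) (by simp [PySem.Set.empty])
        (by intro k; simp [PySem.Set.empty])
      rw [List.nil_append] at hB
      obtain ⟨hDnd, hDm⟩ := hB
      set D := (l.foldl bStep (PySem.Set.empty, PySem.Set.empty)).2 with hD
      have hBval : count_absolute_differences_alt l 0 = (D.length : Int) := by
        rw [count_absolute_differences_alt, if_pos hx]
        rfl
      rw [hBval]
      have hfst : ∀ p ∈ C, p.2 = p.1 + 0 := fun p hp => by
        have := (hCm p).mp hp
        simpa [pairCond] using this.1
      have hnd : (C.map Prod.fst).Nodup := nodup_map_fst 0 C hCnd hfst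
      have hmem : ∀ z : Int, z ∈ C.map Prod.fst ↔ z ∈ D := by
        intro z
        rw [hDm z, List.mem_map]
        constructor
        · rintro ⟨p, hp, rfl⟩
          exact ((hCm p).mp hp).2.2.2 (by simp)
        · intro h
          refine ⟨(z, z), (hCm (z, z)).mpr ?_, rfl⟩
          have hz : z ∈ l := List.one_le_count_iff.mp (by omega)
          exact ⟨by simp, by simpa using hz, by simpa using hz, fun _ => by simpa using h⟩
      have := length_eq_of_nodup_mem (C.map Prod.fst) D hnd hDnd hmem
      rw [List.length_map] at this
      rw [this]
    · rw [count_absolute_differences_alt]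
      simp only [if_neg hx]
      set s := PySem.Set.ofList l with hs
      set pb : Int → Bool := fun v => PySem.Set.contains s (v + |x|) with hpb
      rw [PySem.List.foldl_if_add_one (p := pb), zero_add, List.countP_eq_length_filter]
      have hfst : ∀ p ∈ C, p.2 = p.1 + |x| := fun p hp => ((hCm p).mp hp).1
      have hnd : (C.map Prod.fst).Nodup := nodup_map_fst (|x|) C hCnd hfst
      have hfilnd : (s.filter pb).Nodup := (PySem.Set.nodup_ofList l).filter pb
      have hmem : ∀ z : Int, z ∈ C.map Prod.fst ↔ z ∈ s.filter pb := by
        intro z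
        rw [List.mem_map, List.mem_filter]
        constructor
        · rintro ⟨p, hp, rfl⟩
          obtain ⟨h1, h2, h3, _⟩ := (hCm p).mp hp
          refine ⟨(PySem.Set.mem_ofList _ _).mpr h2, ?_⟩
          exact (PySem.Set.contains_iff _ _).mpr ((PySem.Set.mem_ofList _ _).mpr h3)
        · rintro ⟨h1, h2⟩
          refine ⟨(z, z + |x|), (hCm (z, z + |x|)).mpr ?_, rfl⟩
          have hz : z ∈ l := (PySem.Set.mem_ofList _ _).mp h1
          have hzx : z + |x| ∈ l := (PySem.Set.mem_ofList _ _).mp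
            ((PySem.Set.contains_iff _ _).mp h2)
          exact ⟨rfl, hz, hzx, fun h => absurd (by simp [h]) hx⟩
      have := length_eq_of_nodup_mem (C.map Prod.fst) (s.filter pb) hnd hfilnd hmem
      rw [List.length_map] at this
      rw [this]
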